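-- pv_equiv track=rewrite | github.com/HuckZou/NASDAQ_ITCH5.0_Pasers_And_BookBuilder | bookbuilders/pythonbookbuilder/book_builder.py | ten_orderbook_output
-- ===== SOURCE A (Python) =====
-- from heapq import nlargest, nsmallest
--
-- def ten_orderbook_output(time, bid, ask, messageType):
--     array_value = [0] * 42
--     array_value[0] = time
--     array_value[1] = messageType
--     bid_position = 2
--     ask_position = 12
--     for key in nlargest(10, bid):
--         array_value[bid_position] = key
--         array_value[bid_position + 20] = bid[key]
--         bid_position += 1
--
--     for key in nsmallest(10, ask):
--         array_value[ask_position] = key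
--         array_value[ask_position + 20] = ask[key]
--         ask_position += 1
--     return (array_value)
-- ===== SOURCE B (Python) =====
-- def ten_orderbook_output(time, bid, ask, messageType):
--     bid_keys = sorted(bid, reverse=True)[:10]
--     ask_keys = sorted(ask)[:10]
--
--     def pad(xs):
--         return xs + [0] * (10 - len(xs))
--
--     return ([time, messageType]
--             + pad(bid_keys)
--             + pad(ask_keys)
--             + pad([bid[k] for k in bid_keys])
--             + pad([ask[k] for k in ask_keys]))
-- ===== Notes on version B (the rewrite author's own statement) =====
-- stated objective: simpler
-- what changed: Replaces heapq's bounded-heap selection (nlargest/nsmallest) and in-place index writes into a preallocated 42-slot array by a full sort of the keys with a [:10] slice and direct construction of the output as a concatenation of padded sections.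
import Mathlib
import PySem

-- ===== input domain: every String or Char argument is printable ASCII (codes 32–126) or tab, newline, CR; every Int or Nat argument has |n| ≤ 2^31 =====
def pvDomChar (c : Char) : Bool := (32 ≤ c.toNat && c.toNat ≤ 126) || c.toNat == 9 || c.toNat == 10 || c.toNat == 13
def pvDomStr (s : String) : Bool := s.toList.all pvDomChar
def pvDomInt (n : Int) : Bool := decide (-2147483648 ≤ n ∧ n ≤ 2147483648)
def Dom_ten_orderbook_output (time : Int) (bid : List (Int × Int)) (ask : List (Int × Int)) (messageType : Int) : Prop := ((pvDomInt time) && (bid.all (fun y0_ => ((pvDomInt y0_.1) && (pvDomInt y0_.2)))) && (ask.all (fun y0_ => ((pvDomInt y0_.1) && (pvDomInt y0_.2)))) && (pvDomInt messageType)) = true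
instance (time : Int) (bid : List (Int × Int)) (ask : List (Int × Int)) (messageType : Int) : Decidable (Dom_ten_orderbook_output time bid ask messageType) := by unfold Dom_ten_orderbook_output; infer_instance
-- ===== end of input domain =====

-- B replaces heapq's bounded-heap selection and index writes into a preallocated 42-array
-- by a full sort of the keys sliced to 10 and a concatenation of padded sections (objective: simpler).

-- ===== PORT A =====

-- dict lookup d[k] (first match; in both ports k always comes from the dict's own keys)
def pvLookup (d : List (Int × Int)) (k : Int) : Int :=
  (((d.find? (fun p => p.1 == k)).map Prod.snd).getD 0)

-- hand port of heapq.nlargest(n, xs) for Int iterables: the n largest, in descending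
-- order (exact as a value: repeated extraction of the first maximum)
def pvNlargest : Nat → List Int → List Int
  | 0, _ => []
  | n+1, xs =>
    match PySem.List.max? xs (fun x => x) with
    | none => []
    | some m => m :: pvNlargest n (xs.erase m)

-- hand port of heapq.nsmallest(n, xs) for Int iterables (exact as a value)
def pvNsmallest : Nat → List Int → List Int
  | 0, _ => []
  | n+1, xs =>
    match PySem.List.min? xs (fun x => x) with
    | none => []
    | some m => m :: pvNsmallest n (xs.erase m)

-- A's for-loop: array[pos] = key; array[pos+20] = d[key]; pos += 1
def pvWriteLoop (d : List (Int × Int)) : List Int → Nat → List Int → List Int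
  | arr, _, [] => arr
  | arr, p, k :: ks => pvWriteLoop d ((arr.set p k).set (p + 20) (pvLookup d k)) (p + 1) ks

def ten_orderbook_output (time : Int) (bid : List (Int × Int)) (ask : List (Int × Int)) (messageType : Int) : List Int :=
  let arr0 := ((List.replicate 42 (0 : Int)).set 0 time).set 1 messageType
  let arr1 := pvWriteLoop bid arr0 2 (pvNlargest 10 (bid.map Prod.fst))
  pvWriteLoop ask arr1 12 (pvNsmallest 10 (ask.map Prod.fst))

-- ===== PORT B =====

def pvPad10 (xs : List Int) : List Int := xs ++ List.replicate (10 - xs.length) (0 : Int)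

def ten_orderbook_output_alt (time : Int) (bid : List (Int × Int)) (ask : List (Int × Int)) (messageType : Int) : List Int :=
  let bidKeys := (PySem.List.sorted (bid.map Prod.fst) (fun x => x) true).take 10
  let askKeys := (PySem.List.sorted (ask.map Prod.fst) (fun x => x) false).take 10
  [time, messageType]
    ++ pvPad10 bidKeys ++ pvPad10 askKeys
    ++ pvPad10 (bidKeys.map (pvLookup bid)) ++ pvPad10 (askKeys.map (pvLookup ask))

-- ===== PRECONDITION & SPEC =====
-- Pre_ excludes association lists with duplicate keys: those do not represent any Python
-- dict argument (a Python dict has unique keys), so A's behaviour on them is not defined by the source.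
def Pre_ten_orderbook_output (time : Int) (bid : List (Int × Int)) (ask : List (Int × Int)) (messageType : Int) : Prop :=
  (bid.map Prod.fst).Nodup ∧ (ask.map Prod.fst).Nodup

instance (time : Int) (bid : List (Int × Int)) (ask : List (Int × Int)) (messageType : Int) : Decidable (Pre_ten_orderbook_output time bid ask messageType) := by unfold Pre_ten_orderbook_output; infer_instance

def pvWitness_ten_orderbook_output : Int × (List (Int × Int)) × (List (Int × Int)) × Int :=
  (5, [(3, 7), (1, 2)], [(4, 9)], 0)

def Spec_ten_orderbook_output (time : Int) (bid : List (Int × Int)) (ask : List (Int × Int)) (messageType : Int) (out : List Int) : Prop := out = ten_orderbook_output_alt time bid ask messageType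
instance (time : Int) (bid : List (Int × Int)) (ask : List (Int × Int)) (messageType : Int) (out : List Int) : Decidable (Spec_ten_orderbook_output time bid ask messageType out) := by unfold Spec_ten_orderbook_output; infer_instance

-- ===== CLAIM (what is proved, stated in full; the proofs are below) =====
def Claim_equal_ten_orderbook_output : Prop := ∀ (time : Int) (bid : List (Int × Int)) (ask : List (Int × Int)) (messageType : Int), Dom_ten_orderbook_output time bid ask messageType → Pre_ten_orderbook_output time bid ask messageType → Spec_ten_orderbook_output time bid ask messageType (ten_orderbook_output time bid ask messageType)

-- ===== LEMMAS AND PROOFS =====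

theorem getD_set (l : List Int) (i j : Nat) (a : Int) :
    (l.set i a).getD j 0 = if i = j ∧ i < l.length then a else l.getD j 0 := by
  simp [List.getD, List.getElem?_set]
  split_ifs with h1 h2 h3 <;> simp_all <;> omega

theorem pvWriteLoop_length (d : List (Int × Int)) (ks : List Int) (p : Nat) (arr : List Int) :
    (pvWriteLoop d arr p ks).length = arr.length := by
  induction ks generalizing p arr with
  | nil => rfl
  | cons k ks ih => simp [pvWriteLoop, ih]


theorem pvWriteLoop_getD (d : List (Int × Int)) (ks : List Int) (p : Nat) (arr : List Int) (i : Nat)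
    (hk : ks.length ≤ 20) (hb : p + 20 + ks.length ≤ arr.length) :
    (pvWriteLoop d arr p ks).getD i 0 =
      if p ≤ i ∧ i < p + ks.length then ks.getD (i - p) 0
      else if p + 20 ≤ i ∧ i < p + 20 + ks.length then pvLookup d (ks.getD (i - p - 20) 0)
      else arr.getD i 0 := by
  induction ks generalizing p arr with
  | nil => simp only [pvWriteLoop, List.length_nil]; split_ifs with h1 h2 <;> first | rfl | omega
  | cons k ks ih =>
    simp only [List.length_cons] at hk hb
    simp only [pvWriteLoop]
    rw [ih (p + 1) _ (by omega) (by simp; omega)]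
    rw [getD_set, getD_set]
    simp only [List.length_set, List.length_cons]
    by_cases h1 : i < p
    · rw [if_neg (by omega), if_neg (by omega), if_neg (by omega), if_neg (by omega),
          if_neg (by omega), if_neg (by omega)]
    · by_cases h2 : i = p
      · subst h2
        rw [if_neg (by omega), if_neg (by omega), if_neg (by omega), if_pos ⟨by omega, by omega⟩,
            if_pos ⟨by omega, by omega⟩]
        simp
      · by_cases h3 : i < p + 1 + ks.length
        · rw [if_pos ⟨by omega, by omega⟩, if_pos ⟨by omega, by omega⟩]
          obtain ⟨j, hj⟩ : ∃ j, i - p = j + 1 := ⟨i - p - 1, by omega⟩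
          rw [hj, List.getD_cons_succ]
          congr 1; omega
        · by_cases h4 : i < p + 20
          · rw [if_neg (by omega), if_neg (by omega), if_neg (by omega), if_neg (by omega),
                if_neg (by omega), if_neg (by omega)]
          · by_cases h5 : i = p + 20
            · subst h5
              rw [if_neg (by omega), if_neg (by omega), if_pos ⟨by omega, by omega⟩,
                  if_neg (by omega), if_pos ⟨by omega, by omega⟩]
              simp
            · by_cases h6 : i < p + 21 + ks.length
              · rw [if_neg (by omega), if_pos ⟨by omega, by omega⟩, if_neg (by omega),
                    if_pos ⟨by omega, by omega⟩]
                obtain ⟨j, hj⟩ : ∃ j, i - p - 20 = j + 1 := ⟨i - p - 21, by omega⟩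
                rw [hj, List.getD_cons_succ]
                congr 2; omega
              · rw [if_neg (by omega), if_neg (by omega), if_neg (by omega), if_neg (by omega),
                    if_neg (by omega), if_neg (by omega)]

theorem sorted_desc_cons_max (xs : List Int) (m : Int) (hnd : xs.Nodup)
    (hm : PySem.List.max? xs (fun x => x) = some m) :
    PySem.List.sorted xs (fun x => x) true = m :: PySem.List.sorted (xs.erase m) (fun x => x) true := by
  have hmem : m ∈ xs := PySem.List.max?_mem hm
  have hperm0 : (PySem.List.sorted (xs.erase m) (fun x => x) true).Perm (xs.erase m) :=
    PySem.List.sorted_perm _ _ _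
  have hperm : (m :: PySem.List.sorted (xs.erase m) (fun x => x) true).Perm xs :=
    (hperm0.cons m).trans (List.perm_cons_erase hmem).symm
  apply PySem.List.sorted_rev_eq_of_perm_of_pairwise_gt _ _ _ hperm
  constructor
  · intro y hy
    have hyx : y ∈ xs.erase m := hperm0.mem_iff.mp hy
    have hyx' : y ∈ xs := List.mem_of_mem_erase hyx
    have hle : y ≤ m := by have := PySem.List.max?_isMax hm y hyx'; simpa using this
    have hne : y ≠ m := by
      intro h; subst h
      exact (List.Nodup.not_mem_erase hnd) hyx
    exact lt_of_le_of_ne hle hne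
  · have hge : (PySem.List.sorted (xs.erase m) (fun x => x) true).Pairwise (fun a b => b ≤ a) := by
      have := PySem.List.sorted_pairwise_rev (xs := xs.erase m) (key := fun x => x); simpa using this
    have hnd' : (PySem.List.sorted (xs.erase m) (fun x => x) true).Nodup :=
      hperm0.nodup_iff.mpr (hnd.erase m)
    exact (hge.and hnd').imp (fun h => lt_of_le_of_ne h.1 (Ne.symm h.2))

theorem sorted_asc_cons_min (xs : List Int) (m : Int)
    (hm : PySem.List.min? xs (fun x => x) = some m) :
    PySem.List.sorted xs (fun x => x) false = m :: PySem.List.sorted (xs.erase m) (fun x => x) false := by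
  have hmem : m ∈ xs := PySem.List.min?_mem hm
  have hperm0 : (PySem.List.sorted (xs.erase m) (fun x => x) false).Perm (xs.erase m) :=
    PySem.List.sorted_perm _ _ _
  have hperm : (m :: PySem.List.sorted (xs.erase m) (fun x => x) false).Perm xs :=
    (hperm0.cons m).trans (List.perm_cons_erase hmem).symm
  apply PySem.List.sorted_id_eq_of_perm_of_pairwise _ _ hperm
  constructor
  · intro y hy
    have hyx' : y ∈ xs := List.mem_of_mem_erase (hperm0.mem_iff.mp hy)
    have := PySem.List.min?_isMin hm y hyx'; simpa using this
  · have := PySem.List.sorted_pairwise (xs := xs.erase m) (key := fun x => x); simpa using this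

theorem pvNlargest_eq (n : Nat) (xs : List Int) (hnd : xs.Nodup) :
    pvNlargest n xs = (PySem.List.sorted xs (fun x => x) true).take n := by
  induction n generalizing xs with
  | zero => simp [pvNlargest]
  | succ n ih =>
    cases hm : PySem.List.max? xs (fun x => x) with
    | none =>
      have : xs = [] := (PySem.List.max?_eq_none_iff _ _).mp hm
      subst this; simp [pvNlargest, hm, PySem.List.sorted]
    | some m =>
      rw [sorted_desc_cons_max xs m hnd hm]
      simp only [pvNlargest, hm, List.take_succ_cons]
      rw [ih _ (hnd.erase m)]

theorem pvNsmallest_eq (n : Nat) (xs : List Int) :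
    pvNsmallest n xs = (PySem.List.sorted xs (fun x => x) false).take n := by
  induction n generalizing xs with
  | zero => simp [pvNsmallest]
  | succ n ih =>
    cases hm : PySem.List.min? xs (fun x => x) with
    | none =>
      have : xs = [] := (PySem.List.min?_eq_none_iff _ _).mp hm
      subst this; simp [pvNsmallest, hm, PySem.List.sorted]
    | some m =>
      rw [sorted_asc_cons_min xs m hm]
      simp only [pvNsmallest, hm, List.take_succ_cons]
      rw [ih]


theorem getD_oob (l : List Int) (j : Nat) (h : l.length ≤ j) : l.getD j 0 = 0 :=
  List.getD_eq_default l 0 h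

theorem pvPad10_getD (xs : List Int) (h : xs.length ≤ 10) (j : Nat) :
    (pvPad10 xs).getD j 0 = xs.getD j 0 := by
  unfold pvPad10
  by_cases hj : j < xs.length
  · exact List.getD_append _ _ _ _ hj
  · rw [List.getD_append_right xs _ 0 j (by omega), getD_oob xs j (by omega)]
    by_cases hj2 : j - xs.length < 10 - xs.length
    · rw [List.getD_eq_getElem _ 0 (by simp only [List.length_replicate]; omega),
          List.getElem_replicate]
    · rw [getD_oob _ _ (by simp only [List.length_replicate]; omega)]

theorem pvPad10_length (xs : List Int) (h : xs.length ≤ 10) : (pvPad10 xs).length = 10 := by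
  simp [pvPad10]; omega

theorem getD_map_lookup (d : List (Int × Int)) (xs : List Int) (j : Nat) (h : j < xs.length) :
    (xs.map (pvLookup d)).getD j 0 = pvLookup d (xs.getD j 0) := by
  rw [List.getD_eq_getElem _ _ (by simpa using h), List.getElem_map,
      List.getD_eq_getElem _ _ h]

theorem alt_getD (time : Int) (bid ask : List (Int × Int)) (messageType : Int) (i : Nat) :
    (ten_orderbook_output_alt time bid ask messageType).getD i 0 =
      (if i = 0 then time else if i = 1 then messageType
       else if i < 12 then ((PySem.List.sorted (bid.map Prod.fst) (fun x => x) true).take 10).getD (i - 2) 0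
       else if i < 22 then ((PySem.List.sorted (ask.map Prod.fst) (fun x => x) false).take 10).getD (i - 12) 0
       else if i < 32 then (((PySem.List.sorted (bid.map Prod.fst) (fun x => x) true).take 10).map (pvLookup bid)).getD (i - 22) 0
       else if i < 42 then (((PySem.List.sorted (ask.map Prod.fst) (fun x => x) false).take 10).map (pvLookup ask)).getD (i - 32) 0
       else 0) := by
  simp only [ten_orderbook_output_alt, List.append_assoc]
  set bk := (PySem.List.sorted (bid.map Prod.fst) (fun x => x) true).take 10 with hbk
  set ak := (PySem.List.sorted (ask.map Prod.fst) (fun x => x) false).take 10 with hak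
  have hLb : bk.length ≤ 10 := by rw [hbk]; simp
  have hLa : ak.length ≤ 10 := by rw [hak]; simp
  have hmb : (bk.map (pvLookup bid)).length ≤ 10 := by simpa using hLb
  have hma : (ak.map (pvLookup ask)).length ≤ 10 := by simpa using hLa
  by_cases h0 : i = 0
  · subst h0; simp
  · by_cases h1 : i = 1
    · subst h1; simp
    · rw [List.getD_append_right _ _ _ _ (by simp; omega)]
      simp only [List.length_cons, List.length_nil]
      by_cases h2 : i < 12
      · rw [List.getD_append _ _ _ _ (by rw [pvPad10_length _ hLb]; omega),
            pvPad10_getD _ hLb]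
        rw [if_neg h0, if_neg h1, if_pos h2]
      · rw [List.getD_append_right _ _ _ _ (by rw [pvPad10_length _ hLb]; omega)]
        rw [pvPad10_length _ hLb]
        by_cases h3 : i < 22
        · rw [List.getD_append _ _ _ _ (by rw [pvPad10_length _ hLa]; omega),
              pvPad10_getD _ hLa]
          rw [if_neg h0, if_neg h1, if_neg (by omega), if_pos h3]
          congr 1
        · rw [List.getD_append_right _ _ _ _ (by rw [pvPad10_length _ hLa]; omega)]
          rw [pvPad10_length _ hLa]
          by_cases h4 : i < 32
          · rw [List.getD_append _ _ _ _ (by rw [pvPad10_length _ hmb]; omega),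
                pvPad10_getD _ hmb]
            rw [if_neg h0, if_neg h1, if_neg (by omega), if_neg (by omega), if_pos h4]
            congr 1
          · rw [List.getD_append_right _ _ _ _ (by rw [pvPad10_length _ hmb]; omega)]
            rw [pvPad10_length _ hmb]
            by_cases h5 : i < 42
            · rw [pvPad10_getD _ hma]
              rw [if_neg h0, if_neg h1, if_neg (by omega), if_neg (by omega), if_neg (by omega),
                  if_pos h5]
              congr 1
            · rw [getD_oob _ _ (by rw [pvPad10_length _ hma]; omega)]
              rw [if_neg h0, if_neg h1, if_neg (by omega), if_neg (by omega), if_neg (by omega),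
                  if_neg (by omega)]

theorem alt_length (time : Int) (bid ask : List (Int × Int)) (messageType : Int) :
    (ten_orderbook_output_alt time bid ask messageType).length = 42 := by
  simp only [ten_orderbook_output_alt]
  simp only [List.length_append, List.length_cons, List.length_nil]
  rw [pvPad10_length _ (by simp), pvPad10_length _ (by simp),
      pvPad10_length _ (by simp), pvPad10_length _ (by simp)]

-- ===== VERDICT (by name: the statement is the Claim_ definition above) =====
theorem ten_orderbook_output_spec : Claim_equal_ten_orderbook_output := by
  intro time bid ask messageType _ hpre
  unfold Spec_ten_orderbook_output
  simp only [ten_orderbook_output]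
  rw [pvNlargest_eq 10 _ hpre.1, pvNsmallest_eq 10 _]
  set bk := (PySem.List.sorted (bid.map Prod.fst) (fun x => x) true).take 10 with hbk
  set ak := (PySem.List.sorted (ask.map Prod.fst) (fun x => x) false).take 10 with hak
  have hLb : bk.length ≤ 10 := by rw [hbk]; simp
  have hLa : ak.length ≤ 10 := by rw [hak]; simp
  set arr0 := ((List.replicate 42 (0 : Int)).set 0 time).set 1 messageType with harr0
  have harr0len : arr0.length = 42 := by rw [harr0]; simp
  have harr1len : (pvWriteLoop bid arr0 2 bk).length = 42 := by
    rw [pvWriteLoop_length]; exact harr0len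
  have hLlen : (pvWriteLoop ask (pvWriteLoop bid arr0 2 bk) 12 ak).length = 42 := by
    rw [pvWriteLoop_length]; exact harr1len
  have harr0getD : ∀ j : Nat, 2 ≤ j → arr0.getD j 0 = 0 := by
    intro j hj
    rw [harr0, getD_set, getD_set, if_neg (by omega), if_neg (by omega)]
    by_cases hj42 : j < 42
    · rw [List.getD_eq_getElem _ _ (by simpa using hj42), List.getElem_replicate]
    · exact getD_oob _ _ (by simpa using hj42)
  apply List.ext_getElem
  · rw [hLlen, alt_length]
  intro i hi1 hi2
  rw [hLlen] at hi1
  rw [← List.getD_eq_getElem _ 0, ← List.getD_eq_getElem _ 0]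
  rw [alt_getD]
  simp only [← hbk, ← hak]
  rw [pvWriteLoop_getD ask ak 12 _ i (by omega) (by rw [harr1len]; omega)]
  rw [pvWriteLoop_getD bid bk 2 arr0 i (by omega) (by rw [harr0len]; omega)]
  split_ifs <;>
    first
      | rfl
      | omega
      | (rw [show i - 12 - 20 = i - 32 from by omega]
         exact (getD_map_lookup _ _ _ (by omega)).symm)
      | (rw [show i - 2 - 20 = i - 22 from by omega]
         exact (getD_map_lookup _ _ _ (by omega)).symm)
      | (rw [harr0getD i (by omega), getD_oob _ _ (by (try simp only [List.length_map]); omega)])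
      | (rw [harr0, getD_set, getD_set, if_neg (by simp; omega), if_pos (by simp; omega)])
      | (rw [harr0, getD_set, getD_set, if_pos (by simp; omega)])
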